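-- pv_equiv track=rewrite | github.com/SchriderLab/posSelVsBgs | miscFwdpyFuncs.py | filterMonomorphicSites
-- ===== SOURCE A (Python) =====
-- def filterMonomorphicSites(snps, gameteStrs, allelesFound):
--     newSnps = []
--     newGameteStrs = [""]*len(gameteStrs)
--     for i in range(len(snps)):
--         if len(allelesFound[i]) > 1:
--             for j in range(len(gameteStrs)):
--                 newGameteStrs[j] += gameteStrs[j][i]
--             newSnps.append(snps[i])
--     return newSnps, newGameteStrs
-- ===== SOURCE B (Python) =====
-- def filterMonomorphicSites(snps, gameteStrs, allelesFound):
--     keep = [i for i in range(len(snps)) if len(allelesFound[i]) > 1]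
--     newSnps = [snps[i] for i in keep]
--     newGameteStrs = ["".join(g[i] for i in keep) for g in gameteStrs]
--     return newSnps, newGameteStrs
-- ===== Notes on version B (the rewrite author's own statement) =====
-- stated objective: simpler
-- what changed: Replaces the interleaved site-by-site loop that appends one character at a time to every gamete string with a precomputed index table of kept polymorphic sites, then builds newSnps and each gamete string in one gather/join pass per gamete.
import Mathlib
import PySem

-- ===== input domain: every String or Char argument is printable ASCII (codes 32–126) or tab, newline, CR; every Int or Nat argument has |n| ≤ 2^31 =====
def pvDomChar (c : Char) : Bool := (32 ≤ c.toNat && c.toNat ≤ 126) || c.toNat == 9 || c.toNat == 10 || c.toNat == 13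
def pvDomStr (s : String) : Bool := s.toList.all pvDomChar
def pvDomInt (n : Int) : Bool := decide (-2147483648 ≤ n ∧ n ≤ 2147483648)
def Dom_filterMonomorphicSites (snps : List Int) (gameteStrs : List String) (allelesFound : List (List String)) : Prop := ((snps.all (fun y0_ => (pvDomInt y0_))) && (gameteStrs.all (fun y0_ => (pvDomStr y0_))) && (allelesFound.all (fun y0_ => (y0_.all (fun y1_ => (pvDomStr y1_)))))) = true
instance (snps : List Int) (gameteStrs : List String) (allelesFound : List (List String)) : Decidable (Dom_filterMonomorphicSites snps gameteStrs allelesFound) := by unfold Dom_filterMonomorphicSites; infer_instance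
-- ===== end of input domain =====

-- B replaces A's interleaved per-site, per-character string accumulation by an index table of
-- kept polymorphic sites followed by one gather pass per gamete (simpler decomposition).


-- ===== PORT A =====
-- Strings are handled on the List Char side (PySem convention), joined back at the end.
-- All indexing in A's loops is in range under Pre_ (outside Pre_ Python raises IndexError),
-- so it is ported with the total getD.
def filterMonomorphicSites (snps : List Int) (gameteStrs : List String) (allelesFound : List (List String)) : List Int × List String :=
  let gl : List (List Char) := gameteStrs.map String.toList
  let res := (List.range snps.length).foldl
    (fun (st : List Int × List (List Char)) i =>
      if 1 < (allelesFound.getD i []).length then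
        let ng := (List.range gameteStrs.length).foldl
          (fun ngs j => ngs.set j ((ngs.getD j []) ++ [(gl.getD j []).getD i ' '])) st.2
        (st.1 ++ [snps.getD i 0], ng)
      else st)
    ([], List.replicate gameteStrs.length [])
  (res.1, res.2.map String.ofList)

-- ===== PORT B =====
def filterMonomorphicSites_alt (snps : List Int) (gameteStrs : List String) (allelesFound : List (List String)) : List Int × List String :=
  let keep := (List.range snps.length).filter (fun i => 1 < (allelesFound.getD i []).length)
  (keep.map (fun i => snps.getD i 0),
   gameteStrs.map (fun g => String.ofList (keep.map (fun i => g.toList.getD i ' '))))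

-- ===== PRECONDITION & SPEC =====
-- Pre_ excludes exactly the inputs where Python A raises IndexError: allelesFound shorter than
-- snps, or a kept (polymorphic) site index beyond the end of some gamete string.
def Pre_filterMonomorphicSites (snps : List Int) (gameteStrs : List String) (allelesFound : List (List String)) : Prop :=
  snps.length ≤ allelesFound.length ∧
  ∀ i < snps.length, 1 < (allelesFound.getD i []).length → ∀ g ∈ gameteStrs, i < g.toList.length
instance (snps : List Int) (gameteStrs : List String) (allelesFound : List (List String)) : Decidable (Pre_filterMonomorphicSites snps gameteStrs allelesFound) := by unfold Pre_filterMonomorphicSites; infer_instance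

def pvWitness_filterMonomorphicSites : List Int × List String × List (List String) :=
  ([1, 2], (["ab", "aa"], [["x", "y"], ["z"]]))

def Spec_filterMonomorphicSites (snps : List Int) (gameteStrs : List String) (allelesFound : List (List String)) (out : List Int × List String) : Prop := out = filterMonomorphicSites_alt snps gameteStrs allelesFound
instance (snps : List Int) (gameteStrs : List String) (allelesFound : List (List String)) (out : List Int × List String) : Decidable (Spec_filterMonomorphicSites snps gameteStrs allelesFound out) := by unfold Spec_filterMonomorphicSites; infer_instance

-- ===== CLAIM (what is proved, stated in full; the proofs are below) =====
def Claim_equal_filterMonomorphicSites : Prop := ∀ (snps : List Int) (gameteStrs : List String) (allelesFound : List (List String)), Dom_filterMonomorphicSites snps gameteStrs allelesFound → Pre_filterMonomorphicSites snps gameteStrs allelesFound → Spec_filterMonomorphicSites snps gameteStrs allelesFound (filterMonomorphicSites snps gameteStrs allelesFound)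

-- ===== LEMMAS AND PROOFS =====

-- A's inner loop over j = pre.length, …, pre.length + gs.length - 1 sets each position of the
-- accumulator once, left to right; pre/pregs are the already-processed prefixes.
theorem pv_inner_loop (i : Nat) :
    ∀ (gs ngs pre pregs : List (List Char)), ngs.length = gs.length → pre.length = pregs.length →
    List.foldl (fun ngs j => ngs.set j ((ngs.getD j []) ++ [((pregs ++ gs).getD j []).getD i ' ']))
      (pre ++ ngs) (List.range' pre.length gs.length 1)
    = pre ++ (List.zipWith (fun s g => s ++ [g.getD i ' ']) ngs gs) := by
  intro gs
  induction gs with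
  | nil => intro ngs pre pregs h _; simp_all [List.length_eq_zero_iff.mp h]
  | cons g gs' ih =>
    intro ngs pre pregs h hp
    match ngs, h with
    | s :: ngs', h' =>
      simp only [List.length_cons]
      rw [List.range'_succ, List.foldl_cons]
      have h1 : (pre ++ s :: ngs').getD pre.length [] = s := by
        rw [List.getD_append_right _ _ _ _ (le_refl _)]; simp
      have h2 : (pregs ++ g :: gs').getD pre.length [] = g := by
        rw [hp, List.getD_append_right _ _ _ _ (le_refl _)]; simp
      rw [h1, h2]
      have h3 : (pre ++ s :: ngs').set pre.length (s ++ [g.getD i ' ']) = (pre ++ [s ++ [g.getD i ' ']]) ++ ngs' := by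
        simp
      rw [h3]
      have h4 : pregs ++ g :: gs' = (pregs ++ [g]) ++ gs' := by simp
      have h5 : pre.length + 1 = (pre ++ [s ++ [g.getD i ' ']]).length := by simp
      rw [h4, h5, ih ngs' (pre ++ [s ++ [g.getD i ' ']]) (pregs ++ [g]) (by simpa using h') (by simp [hp])]
      simp

-- Outer-loop invariant: after the first k sites, A's state is the filtered index list mapped
-- through snps, and per gamete the kept characters so far (B's transposed form).
theorem pv_outer (snps : List Int) (allelesFound : List (List String)) (gl : List (List Char)) (k : Nat) :
    (List.range k).foldl
      (fun (st : List Int × List (List Char)) i =>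
        if 1 < (allelesFound.getD i []).length then
          ((st.1 ++ [snps.getD i 0]),
           (List.range gl.length).foldl
            (fun ngs j => ngs.set j ((ngs.getD j []) ++ [(gl.getD j []).getD i ' '])) st.2)
        else st)
      ([], List.replicate gl.length [])
    = (((List.range k).filter (fun i => 1 < (allelesFound.getD i []).length)).map (fun i => snps.getD i 0),
       gl.map (fun g => ((List.range k).filter (fun i => 1 < (allelesFound.getD i []).length)).map (fun i => g.getD i ' '))) := by
  induction k with
  | zero => simp
  | succ k ih =>
    rw [List.range_succ, List.foldl_append, List.filter_append, ih, List.foldl_cons, List.foldl_nil]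
    have hk2 : allelesFound.getD k ([] : List String) = allelesFound[k]?.getD [] := List.getD_eq_getElem?_getD
    by_cases hk : 1 < (allelesFound.getD k []).length
    · rw [if_pos hk]
      rw [hk2] at hk
      have := pv_inner_loop k gl
        (gl.map (fun g => ((List.range k).filter (fun i => 1 < (allelesFound.getD i []).length)).map (fun i => g.getD i ' ')))
        [] [] (by simp) rfl
      simp only [List.nil_append, List.length_nil, List.range_eq_range'] at this ⊢
      rw [this]
      simp [hk, List.zipWith_map_left]
    · rw [if_neg hk]
      rw [hk2] at hk
      simp [hk]

-- ===== VERDICT (by name: the statement is the Claim_ definition above) =====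
theorem filterMonomorphicSites_spec : Claim_equal_filterMonomorphicSites := by
  intro snps gameteStrs allelesFound _ _
  unfold Spec_filterMonomorphicSites filterMonomorphicSites filterMonomorphicSites_alt
  have hlen : gameteStrs.length = (gameteStrs.map String.toList).length := (List.length_map ..).symm
  simp only []
  rw [hlen, pv_outer snps allelesFound (gameteStrs.map String.toList) snps.length]
  simp [List.map_map, Function.comp]
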